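-- pv_equiv track=rewrite | github.com/unjugador16/Proyecto-PDC-UNAL | Codigo Principal.py | personajes_principales
-- ===== SOURCE A (Python) =====
-- def personajes_principales(pers,longitud_lista_palabras): #10
--     inv,pers_prin={},[]
--     for llave, valor in pers.items():
--         lista = inv.get(valor, [])
--         lista.append(llave)
--         inv[valor] = lista
--     for i in inv:
--         if i>longitud_lista_palabras//450:
--             for j in inv.get(i):
--                 pers_prin.append(j)
--     return pers_prin
-- ===== SOURCE B (Python) =====
-- def personajes_principales(pers, longitud_lista_palabras):
--     umbral = longitud_lista_palabras // 450
--     res = []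
--     for v in dict.fromkeys(pers.values()):
--         if v > umbral:
--             res += [k for k, w in pers.items() if w == v]
--     return res
-- ===== Notes on version B (the rewrite author's own statement) =====
-- stated objective: simpler
-- what changed: B drops A's prebuilt value-to-keys inverse dict: it takes the distinct values in first-appearance order (dict.fromkeys) and, for each value above the threshold, rescans pers.items() collecting its keys.
import Mathlib
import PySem

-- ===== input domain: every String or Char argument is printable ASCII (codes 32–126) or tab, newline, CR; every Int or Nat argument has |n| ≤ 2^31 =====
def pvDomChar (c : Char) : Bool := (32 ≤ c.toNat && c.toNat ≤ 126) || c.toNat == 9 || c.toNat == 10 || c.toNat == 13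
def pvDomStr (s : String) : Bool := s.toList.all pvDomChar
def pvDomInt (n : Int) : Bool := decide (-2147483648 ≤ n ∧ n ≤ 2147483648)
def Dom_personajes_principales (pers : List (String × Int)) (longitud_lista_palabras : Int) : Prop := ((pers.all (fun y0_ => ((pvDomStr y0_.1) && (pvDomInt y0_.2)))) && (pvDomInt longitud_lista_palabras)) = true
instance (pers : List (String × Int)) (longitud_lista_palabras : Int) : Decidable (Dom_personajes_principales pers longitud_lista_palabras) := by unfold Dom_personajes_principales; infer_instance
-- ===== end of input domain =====

-- B: no inverse value→keys dict; distinct values in first-appearance order, then one rescan of the items per qualifying value (simpler decomposition, not faster).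

-- ===== PORT A =====
def personajes_principales (pers : List (String × Int)) (longitud_lista_palabras : Int) : List String :=
  let inv : PySem.Dict Int (List String) :=
    pers.foldl (fun inv kv =>
      let lista := inv.getD kv.2 []
      let lista := lista ++ [kv.1]
      inv.insert kv.2 lista) PySem.Dict.empty
  inv.keys.foldl (fun pers_prin i =>
    if i > PySem.Int.floordiv longitud_lista_palabras 450 then
      pers_prin ++ inv.getD i []
    else pers_prin) []

-- ===== PORT B =====
def personajes_principales_alt (pers : List (String × Int)) (longitud_lista_palabras : Int) : List String :=
  let umbral := PySem.Int.floordiv longitud_lista_palabras 450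
  (PySem.List.dedup (pers.map (fun kv => kv.2))).foldl (fun res v =>
    if v > umbral then
      res ++ (pers.filter (fun kv => kv.2 == v)).map (fun kv => kv.1)
    else res) []

-- ===== PRECONDITION & SPEC =====
def Spec_personajes_principales (pers : List (String × Int)) (longitud_lista_palabras : Int) (out : List String) : Prop := out = personajes_principales_alt pers longitud_lista_palabras
instance (pers : List (String × Int)) (longitud_lista_palabras : Int) (out : List String) : Decidable (Spec_personajes_principales pers longitud_lista_palabras out) := by unfold Spec_personajes_principales; infer_instance

-- ===== CLAIM (what is proved, stated in full; the proofs are below) =====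
def Claim_equal_personajes_principales : Prop := ∀ (pers : List (String × Int)) (longitud_lista_palabras : Int), Dom_personajes_principales pers longitud_lista_palabras → Spec_personajes_principales pers longitud_lista_palabras (personajes_principales pers longitud_lista_palabras)

-- ===== LEMMAS AND PROOFS =====

-- A's dict-building loop body is exactly d.modify kv.2 [] (· ++ [kv.1]).
theorem pv_inv_eq (pers : List (String × Int)) :
    pers.foldl (fun (inv : PySem.Dict Int (List String)) kv =>
      let lista := inv.getD kv.2 []
      let lista := lista ++ [kv.1]
      inv.insert kv.2 lista) PySem.Dict.empty
    = pers.foldl (fun inv kv => inv.modify kv.2 [] (· ++ [kv.1])) PySem.Dict.empty := by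
  rfl

theorem pv_inv_keys (pers : List (String × Int)) :
    (pers.foldl (fun (inv : PySem.Dict Int (List String)) kv =>
      inv.modify kv.2 [] (· ++ [kv.1])) PySem.Dict.empty).keys
    = PySem.List.dedup (pers.map (fun kv => kv.2)) := by
  refine (PySem.Dict.keys_foldl_modify_key pers (fun kv => kv.2) []
    (fun _ kv l => l ++ [kv.1]) PySem.Dict.empty).trans ?_
  simp [PySem.Set.update_nil_left]

theorem pv_inv_getD (pers : List (String × Int)) (v : Int) :
    (pers.foldl (fun (inv : PySem.Dict Int (List String)) kv =>
      inv.modify kv.2 [] (· ++ [kv.1])) PySem.Dict.empty).getD v []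
    = (pers.filter (fun kv => kv.2 == v)).map (fun kv => kv.1) := by
  have h := PySem.Dict.getD_foldl_modify_append (l := pers.map Prod.swap)
    (d := (PySem.Dict.empty : PySem.Dict Int (List String))) (c := v)
  rw [List.foldl_map] at h
  simp only [Prod.swap] at h
  rw [h]
  simp [List.filter_map, Function.comp_def]

-- ===== VERDICT (by name: the statement is the Claim_ definition above) =====
theorem personajes_principales_spec : Claim_equal_personajes_principales := by
  intro pers L _
  unfold Spec_personajes_principales personajes_principales personajes_principales_alt
  simp only [pv_inv_eq, pv_inv_keys, pv_inv_getD]
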